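-- pv_equiv track=rewrite | github.com/Heir-of-God/Project-S | Codeforces/Contests/codeforces_round_#966/C.py | check
-- ===== SOURCE A (Python) =====
-- def check(temp, s):
--     matching = {}
--     if len(temp) != len(s):
--         return "NO"
--
--     for ind, char in enumerate(s):
--         el = temp[ind]
--         if el in matching and matching[el] != char or char in matching and matching[char] != el:
--             return "NO"
--         matching[char] = el
--         matching[el] = char
--
--     return "YES"
-- ===== SOURCE B (Python) =====
-- def check(temp, s):
--     if len(temp) != len(s):
--         return "NO"
--     partners = {}
--     for el, char in zip(temp, s):
--         partners.setdefault(el, set()).add(char)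
--         partners.setdefault(char, set()).add(el)
--     for ps in partners.values():
--         if len(ps) > 1:
--             return "NO"
--     return "YES"
-- ===== Notes on version B (the rewrite author's own statement) =====
-- stated objective: alternative
-- what changed: Replaces the single early-returning scan that maintains the latest partner per symbol with an index-building pass recording each symbol's full set of partners (both directions) plus a separate verification pass checking every partner-set is a singleton.
import Mathlib
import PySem

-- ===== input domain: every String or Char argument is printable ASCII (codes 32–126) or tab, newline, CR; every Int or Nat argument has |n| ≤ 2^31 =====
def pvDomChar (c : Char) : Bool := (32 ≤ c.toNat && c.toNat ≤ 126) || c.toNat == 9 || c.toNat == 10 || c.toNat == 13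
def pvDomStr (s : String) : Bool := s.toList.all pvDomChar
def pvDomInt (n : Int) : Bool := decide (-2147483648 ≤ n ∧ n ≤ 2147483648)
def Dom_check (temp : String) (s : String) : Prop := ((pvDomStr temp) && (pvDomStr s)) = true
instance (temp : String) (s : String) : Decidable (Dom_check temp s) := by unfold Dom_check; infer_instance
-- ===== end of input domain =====

-- B replaces A's single early-returning scan (latest partner per symbol) by an
-- index-building pass collecting each symbol's full partner set plus a separate
-- verification pass; alternative decomposition, same O(n) cost.

-- ===== PORT A =====
-- the for-loop over enumerate(s): state = the 'matching' dict; early return "NO"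
def checkLoop (tl : List Char) : List (Int × Char) → PySem.Dict Char Char → String
  | [], _ => "YES"
  | (ind, char) :: rest, m =>
    match PySem.List.pyGet? tl ind with
    | none => "NO"  -- temp[ind] IndexError: unreachable here, lengths were checked equal
    | some el =>
      if (m.contains el && !(m.get? el == some char)) ||
         (m.contains char && !(m.get? char == some el)) then "NO"
      else checkLoop tl rest ((m.insert char el).insert el char)

def check (temp : String) (s : String) : String :=
  if PySem.Str.len temp ≠ PySem.Str.len s then "NO"
  else checkLoop temp.toList (PySem.List.enumerate s.toList) PySem.Dict.empty

-- ===== PORT B =====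
-- first pass: partners.setdefault(el, set()).add(char); partners.setdefault(char, set()).add(el)
-- (setdefault-then-in-place-add = Dict.modify with an empty-set default)
def buildPartners : List (Char × Char) → PySem.Dict Char (PySem.Set Char) → PySem.Dict Char (PySem.Set Char)
  | [], d => d
  | (el, char) :: rest, d =>
      buildPartners rest
        ((d.modify el PySem.Set.empty (fun S => PySem.Set.add S char)).modify
           char PySem.Set.empty (fun S => PySem.Set.add S el))

-- second pass over partners.values(): any set with more than one element ⇒ "NO"
def check_alt (temp : String) (s : String) : String :=
  if PySem.Str.len temp ≠ PySem.Str.len s then "NO"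
  else if (buildPartners (temp.toList.zip s.toList) PySem.Dict.empty).values.any
            (fun S => PySem.Set.len S > 1) then "NO"
  else "YES"

-- ===== PRECONDITION & SPEC =====
def Spec_check (temp : String) (s : String) (out : String) : Prop := out = check_alt temp s
instance (temp : String) (s : String) (out : String) : Decidable (Spec_check temp s out) := by unfold Spec_check; infer_instance

-- ===== CLAIM (what is proved, stated in full; the proofs are below) =====
def Claim_equal_check : Prop := ∀ (temp : String) (s : String), Dom_check temp s → Spec_check temp s (check temp s)

-- ===== LEMMAS AND PROOFS =====

-- x and y are paired at some position (in either direction)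
def PRel (ps : List (Char × Char)) (x y : Char) : Prop := (x, y) ∈ ps ∨ (y, x) ∈ ps

-- every symbol has at most one distinct partner
def POk (ps : List (Char × Char)) : Prop := ∀ x y z, PRel ps x y → PRel ps x z → y = z

lemma PRel_append {ps qs : List (Char × Char)} {x y : Char} :
    PRel (ps ++ qs) x y ↔ PRel ps x y ∨ PRel qs x y := by
  simp [PRel, List.mem_append]; tauto

lemma PRel_cons {el char x y : Char} {ps : List (Char × Char)} :
    PRel ((el, char) :: ps) x y ↔ (x = el ∧ y = char) ∨ (x = char ∧ y = el) ∨ PRel ps x y := by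
  simp [PRel, Prod.ext_iff]; tauto

-- A's loop, rephrased over the list of pairs (the bridge lemma below connects them)
def pairLoop : List (Char × Char) → PySem.Dict Char Char → String
  | [], _ => "YES"
  | (el, char) :: rest, m =>
    if (m.contains el && !(m.get? el == some char)) ||
       (m.contains char && !(m.get? char == some el)) then "NO"
    else pairLoop rest ((m.insert char el).insert el char)

-- bridge: enumerate(s) + temp[ind] walks exactly the zipped pairs
lemma checkLoop_eq_pairLoop :
    ∀ (l2 l1 pre : List Char) (m : PySem.Dict Char Char), l1.length = l2.length →
      checkLoop (pre ++ l1) (PySem.List.enumerate l2 (pre.length : Int)) m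
        = pairLoop (l1.zip l2) m := by
  intro l2
  induction l2 with
  | nil => intro l1 pre m h; simp at h; simp [h, PySem.List.enumerate, checkLoop, pairLoop]
  | cons c cs ih =>
    intro l1 pre m h
    match l1 with
    | [] => simp at h
    | e :: es =>
      simp at h
      rw [PySem.List.enumerate_cons]
      show checkLoop _ _ _ = _
      rw [checkLoop]
      have hg : PySem.List.pyGet? (pre ++ e :: es) ((pre.length : Int)) = some e := by
        rw [PySem.List.pyGet?_natCast]
        simp
      rw [hg]
      simp only [List.zip_cons_cons, pairLoop]
      split
      · rfl
      · have := ih es (pre ++ [e]) ((m.insert c e).insert e c) h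
        simp only [List.append_assoc, List.singleton_append, List.length_append,
          List.length_singleton] at this
        rw [← this]
        norm_num

-- A's loop invariant: m maps each seen symbol to its unique partner so far
lemma pairLoop_spec :
    ∀ (ps seen : List (Char × Char)) (m : PySem.Dict Char Char), POk seen →
      (∀ x y, m.get? x = some y ↔ PRel seen x y) →
      (POk (seen ++ ps) → pairLoop ps m = "YES") ∧
      (¬ POk (seen ++ ps) → pairLoop ps m = "NO") := by
  intro ps
  induction ps with
  | nil =>
    intro seen m hok hinv
    refine ⟨fun _ => rfl, fun h => absurd ?_ h⟩
    simpa using hok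
  | cons p rest ih =>
    obtain ⟨el, char⟩ := p
    intro seen m hok hinv
    rw [pairLoop]
    by_cases hcond : ((m.contains el && !(m.get? el == some char)) ||
       (m.contains char && !(m.get? char == some el))) = true
    · -- condition true: some earlier partner disagrees; whole list not POk
      rw [if_pos hcond]
      have hbad : ¬ POk (seen ++ (el, char) :: rest) := by
        intro hPOk
        have hnew : PRel (seen ++ (el, char) :: rest) el char :=
          PRel_append.mpr (Or.inr (PRel_cons.mpr (Or.inl ⟨rfl, rfl⟩)))
        have hnew' : PRel (seen ++ (el, char) :: rest) char el :=
          PRel_append.mpr (Or.inr (PRel_cons.mpr (Or.inr (Or.inl ⟨rfl, rfl⟩))))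
        simp only [Bool.or_eq_true, Bool.and_eq_true, Bool.not_eq_true',
          beq_eq_false_iff_ne, ne_eq, PySem.Dict.contains_eq_isSome_get?,
          Option.isSome_iff_exists] at hcond
        rcases hcond with ⟨⟨y, hy⟩, hne⟩ | ⟨⟨y, hy⟩, hne⟩
        · rw [hy] at hne
          have : PRel (seen ++ (el, char) :: rest) el y :=
            PRel_append.mpr (Or.inl ((hinv el y).mp hy))
          exact hne (by rw [hPOk el y char this hnew])
        · rw [hy] at hne
          have : PRel (seen ++ (el, char) :: rest) char y :=
            PRel_append.mpr (Or.inl ((hinv char y).mp hy))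
          exact hne (by rw [hPOk char y el this hnew'])
      exact ⟨fun h => absurd h hbad, fun _ => rfl⟩
    · rw [if_neg hcond]
      -- condition false: m.get? el ∈ {none, some char}, m.get? char ∈ {none, some el}
      simp only [Bool.or_eq_true, Bool.and_eq_true, Bool.not_eq_true',
        beq_eq_false_iff_ne, ne_eq, PySem.Dict.contains_eq_isSome_get?,
        Option.isSome_iff_exists, not_or, not_and] at hcond
      obtain ⟨h1, h2⟩ := hcond
      have hel : m.get? el = none ∨ m.get? el = some char := by
        cases hme : m.get? el with
        | none => exact Or.inl rfl
        | some y => exact Or.inr (hme ▸ not_not.mp (h1 ⟨y, hme⟩))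
      have hch : m.get? char = none ∨ m.get? char = some el := by
        cases hme : m.get? char with
        | none => exact Or.inl rfl
        | some y => exact Or.inr (hme ▸ not_not.mp (h2 ⟨y, hme⟩))
      have hok' : POk (seen ++ [(el, char)]) := by
        intro x y z hxy hxz
        have key : ∀ w v, PRel (seen ++ [(el, char)]) w v →
            PRel seen w v ∨ (w = el ∧ v = char) ∨ (w = char ∧ v = el) := by
          intro w v h
          rcases PRel_append.mp h with h | h
          · exact Or.inl h
          · rcases PRel_cons.mp h with h | h | h
            · exact Or.inr (Or.inl h)
            · exact Or.inr (Or.inr h)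
            · simp [PRel] at h
        have uniq : ∀ w v, PRel seen w v → (w = el → v = char) ∧ (w = char → v = el) := by
          intro w v hwv
          constructor
          · rintro rfl
            have := (hinv w v).mpr hwv
            rcases hel with h | h
            · rw [h] at this; cases this
            · rw [h] at this; exact (Option.some.inj this).symm
          · rintro rfl
            have := (hinv w v).mpr hwv
            rcases hch with h | h
            · rw [h] at this; cases this
            · rw [h] at this; exact (Option.some.inj this).symm
        rcases key x y hxy with hy | hy | hy <;> rcases key x z hxz with hz | hz | hz
        · exact hok x y z hy hz
        · exact ((uniq x y hy).1 hz.1).symm ▸ hz.2.symm ▸ rfl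
        · exact ((uniq x y hy).2 hz.1).symm ▸ hz.2.symm ▸ rfl
        · exact (uniq x z hz).1 hy.1 ▸ hy.2
        · rw [hy.2, hz.2]
        · rw [hy.2, hz.2, ← hy.1, hz.1]
        · exact (uniq x z hz).2 hy.1 ▸ hy.2
        · rw [hy.2, hz.2, ← hz.1, hy.1]
        · rw [hy.2, hz.2]
      have hinv' : ∀ x y, ((m.insert char el).insert el char).get? x = some y ↔
          PRel (seen ++ [(el, char)]) x y := by
        intro x y
        rw [PySem.Dict.get?_insert, PySem.Dict.get?_insert]
        constructor
        · intro h
          by_cases hxe : x = el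
          · rw [if_pos hxe] at h
            exact PRel_append.mpr (Or.inr (PRel_cons.mpr (Or.inl ⟨hxe, (Option.some.inj h).symm⟩)))
          · rw [if_neg hxe] at h
            by_cases hxc : x = char
            · rw [if_pos hxc] at h
              exact PRel_append.mpr (Or.inr (PRel_cons.mpr (Or.inr (Or.inl ⟨hxc, (Option.some.inj h).symm⟩))))
            · rw [if_neg hxc] at h
              exact PRel_append.mpr (Or.inl ((hinv x y).mp h))
        · intro h
          rcases PRel_append.mp h with h | h
          · have hm := (hinv x y).mpr h
            by_cases hxe : x = el
            · rw [if_pos hxe]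
              subst hxe
              rcases hel with h' | h'
              · rw [h'] at hm; cases hm
              · rw [h'] at hm; rw [Option.some.inj hm]
            · rw [if_neg hxe]
              by_cases hxc : x = char
              · rw [if_pos hxc]
                subst hxc
                rcases hch with h' | h'
                · rw [h'] at hm; cases hm
                · rw [h'] at hm; rw [Option.some.inj hm]
              · rw [if_neg hxc]; exact hm
          · rcases PRel_cons.mp h with ⟨rfl, rfl⟩ | ⟨rfl, rfl⟩ | h
            · simp
            · by_cases hxe : x = y
              · simp [hxe]
              · rw [if_neg hxe]; simp
            · simp [PRel] at h
      have := ih (seen ++ [(el, char)]) _ hok' hinv'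
      rw [List.append_assoc, List.singleton_append] at this
      exact this

-- B's build invariant: each symbol's stored set is exactly its (distinct) partners so far
def BInv (d : PySem.Dict Char (PySem.Set Char)) (seen : List (Char × Char)) : Prop :=
  d.keys.Nodup ∧
  ∀ x, (d.getD x PySem.Set.empty).Nodup ∧
    (∀ y, y ∈ d.getD x PySem.Set.empty ↔ PRel seen x y)

lemma nodup_keys_modify (d : PySem.Dict Char (PySem.Set Char)) (k : Char)
    (d0 : PySem.Set Char) (f : PySem.Set Char → PySem.Set Char) (h : d.keys.Nodup) :
    (d.modify k d0 f).keys.Nodup := by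
  rw [PySem.Dict.keys_modify]
  by_cases hc : d.contains k = true
  · rw [PySem.Dict.keys_insert_of_contains _ _ hc]; exact h
  · rw [PySem.Dict.keys_insert_of_not_contains _ _ (by simpa using hc)]
    refine List.Nodup.append h (List.nodup_singleton k) ?_
    intro a ha hb
    simp at hb; subst hb
    rw [PySem.Dict.contains_iff_mem_keys] at hc
    exact hc ha

lemma getD_buildStep (d : PySem.Dict Char (PySem.Set Char)) (el char x : Char) :
    ((d.modify el PySem.Set.empty (fun S => PySem.Set.add S char)).modify
       char PySem.Set.empty (fun S => PySem.Set.add S el)).getD x PySem.Set.empty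
      = if x = char then
          PySem.Set.add (if char = el then PySem.Set.add (d.getD char PySem.Set.empty) char
                         else d.getD char PySem.Set.empty) el
        else if x = el then PySem.Set.add (d.getD el PySem.Set.empty) char
        else d.getD x PySem.Set.empty := by
  rw [PySem.Dict.getD_modify]
  by_cases hxc : x = char
  · subst hxc
    rw [if_pos rfl, if_pos rfl, PySem.Dict.getD_modify]
    by_cases hce : x = el
    · subst hce; rfl
    · rw [if_neg hce, if_neg hce]
  · rw [if_neg hxc, if_neg hxc, PySem.Dict.getD_modify]

lemma buildPartners_inv :
    ∀ (ps : List (Char × Char)) (d : PySem.Dict Char (PySem.Set Char)) seen,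
      BInv d seen → BInv (buildPartners ps d) (seen ++ ps) := by
  intro ps
  induction ps with
  | nil => intro d seen h; simpa [buildPartners] using h
  | cons p rest ih =>
    obtain ⟨el, char⟩ := p
    intro d seen h
    obtain ⟨hnd, hpt⟩ := h
    rw [buildPartners]
    have step : BInv ((d.modify el PySem.Set.empty (fun S => PySem.Set.add S char)).modify
        char PySem.Set.empty (fun S => PySem.Set.add S el)) (seen ++ [(el, char)]) := by
      refine ⟨nodup_keys_modify _ _ _ _ (nodup_keys_modify _ _ _ _ hnd), ?_⟩
      intro x
      rw [getD_buildStep]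
      by_cases hxc : x = char
      · subst hxc
        rw [if_pos rfl]
        by_cases hce : x = el
        · subst hce
          rw [if_pos rfl]
          refine ⟨PySem.Set.nodup_add _ _ (PySem.Set.nodup_add _ _ (hpt x).1), ?_⟩
          intro y
          rw [PySem.Set.mem_add, PySem.Set.mem_add, PRel_append, PRel_cons]
          have := (hpt x).2 y
          simp [PRel] at *
          tauto
        · rw [if_neg (fun hh => hce hh)]
          refine ⟨PySem.Set.nodup_add _ _ (hpt x).1, ?_⟩
          intro y
          rw [PySem.Set.mem_add, PRel_append, PRel_cons]
          have := (hpt x).2 y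
          simp [PRel] at *
          tauto
      · rw [if_neg hxc]
        by_cases hxe : x = el
        · subst hxe
          rw [if_pos rfl]
          refine ⟨PySem.Set.nodup_add _ _ (hpt x).1, ?_⟩
          intro y
          rw [PySem.Set.mem_add, PRel_append, PRel_cons]
          have := (hpt x).2 y
          simp [PRel] at *
          tauto
        · rw [if_neg hxe]
          refine ⟨(hpt x).1, ?_⟩
          intro y
          rw [PRel_append, PRel_cons]
          have := (hpt x).2 y
          simp [PRel] at *
          tauto
    have := ih _ _ step
    rwa [List.append_assoc, List.singleton_append] at this

lemma values_any_iff (ps : List (Char × Char)) :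
    ((buildPartners ps PySem.Dict.empty).values.any (fun S => PySem.Set.len S > 1) = true)
      ↔ ¬ POk ps := by
  have hinv0 : BInv PySem.Dict.empty [] := by
    refine ⟨by simp [PySem.Dict.keys_empty], ?_⟩
    intro x
    simp [PySem.Dict.getD_empty, PySem.Set.empty, PRel]
  have hinv := buildPartners_inv ps PySem.Dict.empty [] hinv0
  rw [List.nil_append] at hinv
  obtain ⟨hnd, hpt⟩ := hinv
  set d := buildPartners ps PySem.Dict.empty with hd
  constructor
  · intro hany
    rw [List.any_eq_true] at hany
    obtain ⟨S, hSv, hSlen⟩ := hany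
    simp only [decide_eq_true_eq] at hSlen
    obtain ⟨p, hp, hp2⟩ := List.mem_map.mp hSv
    have hget : d.get? p.1 = some S := by
      refine PySem.Dict.get?_of_mem_items _ ?_ hnd
      have hpe : (p.1, S) = p := by rw [← hp2]
      exact hpe ▸ hp
    have hSgetD : d.getD p.1 PySem.Set.empty = S := by
      rw [PySem.Dict.getD_eq_get?_getD, hget]; rfl
    have hlen2 : 2 ≤ S.length := by
      simp only [PySem.Set.len] at hSlen; omega
    match S, hlen2 with
    | a :: b :: t, _ =>
      have hnd' := hSgetD ▸ (hpt p.1).1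
      have hab : a ≠ b := by
        rw [List.nodup_cons] at hnd'
        exact fun hh => hnd'.1 (hh ▸ List.mem_cons_self)
      have ha : PRel ps p.1 a := ((hpt p.1).2 a).mp (by rw [hSgetD]; simp)
      have hb : PRel ps p.1 b := ((hpt p.1).2 b).mp (by rw [hSgetD]; simp)
      intro hOk
      exact hab (hOk p.1 a b ha hb)
  · intro hnOk
    rw [List.any_eq_true]
    simp only [POk, not_forall] at hnOk
    obtain ⟨x, y, z, hy, hz, hyz⟩ := hnOk
    have hyS : y ∈ d.getD x PySem.Set.empty := ((hpt x).2 y).mpr hy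
    have hzS : z ∈ d.getD x PySem.Set.empty := ((hpt x).2 z).mpr hz
    obtain ⟨S, hget⟩ : ∃ S, d.get? x = some S := by
      cases hg : d.get? x with
      | none =>
        rw [PySem.Dict.getD_eq_get?_getD, hg] at hyS
        simp [PySem.Set.empty] at hyS
      | some S => exact ⟨S, rfl⟩
    have hSgetD : d.getD x PySem.Set.empty = S := by
      rw [PySem.Dict.getD_eq_get?_getD, hget]; rfl
    rw [hSgetD] at hyS hzS
    refine ⟨S, List.mem_map.mpr ⟨(x, S), PySem.Dict.mem_items_of_get?_eq_some _ hget, rfl⟩, ?_⟩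
    simp only [decide_eq_true_eq, PySem.Set.len]
    have : 2 ≤ S.length := by
      match S, hyS, hzS with
      | [], h, _ => cases h
      | [a], h1, h2 =>
        exfalso
        exact hyz (by rw [List.mem_singleton.mp h1, List.mem_singleton.mp h2])
      | a :: b :: t, _, _ => simp
    omega

-- ===== VERDICT (by name: the statement is the Claim_ definition above) =====
theorem check_spec : Claim_equal_check := by
  unfold Claim_equal_check Spec_check
  intro temp s _
  unfold check check_alt
  by_cases hlen : PySem.Str.len temp ≠ PySem.Str.len s
  · rw [if_pos hlen, if_pos hlen]
  · rw [if_neg hlen, if_neg hlen]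
    have hl : temp.toList.length = s.toList.length := by
      rw [not_not] at hlen
      rw [PySem.Str.len_eq, PySem.Str.len_eq] at hlen
      exact_mod_cast hlen
    have hbridge := checkLoop_eq_pairLoop s.toList temp.toList [] PySem.Dict.empty hl
    simp only [List.nil_append, List.length_nil, Nat.cast_zero] at hbridge
    have hempty : ∀ (x y : Char), (PySem.Dict.empty : PySem.Dict Char Char).get? x = some y ↔ PRel [] x y := by
      intro x y
      simp [PySem.Dict.get?_empty, PRel]
    have hok0 : POk ([] : List (Char × Char)) := by
      intro x y z hy _
      simp [PRel] at hy
    have hspec := pairLoop_spec (temp.toList.zip s.toList) [] PySem.Dict.empty hok0 hempty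
    rw [List.nil_append] at hspec
    rw [show PySem.List.enumerate s.toList = PySem.List.enumerate s.toList 0 from rfl] at hbridge
    rw [hbridge]
    by_cases hOk : POk (temp.toList.zip s.toList)
    · rw [hspec.1 hOk]
      have : ((buildPartners (temp.toList.zip s.toList) PySem.Dict.empty).values.any
          (fun S => PySem.Set.len S > 1)) = false := by
        rw [← Bool.not_eq_true, values_any_iff]
        exact fun h => h hOk
      rw [this]
      rfl
    · rw [hspec.2 hOk, (values_any_iff _).mpr hOk]
      rfl
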